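-- pv_equiv track=rewrite | github.com/Cheng17415/XML | DAM2_Python/ejerciciosCompletos3.py | cincoVocales
-- ===== SOURCE A (Python) =====
-- def cincoVocales(palabra):
--   palabra = palabra.lower()
--   vocales = ('a','e','i','o','u')
--
--   for vocal in vocales:
--     if vocal in palabra:
--       continue
--     else:
--       return False
--   return True
-- ===== SOURCE B (Python) =====
-- def cincoVocales(palabra):
--   a = e = i = o = u = False
--   for c in palabra.lower():
--     if c == 'a':
--       a = True
--     elif c == 'e':
--       e = True
--     elif c == 'i':
--       i = True
--     elif c == 'o':
--       o = True
--     elif c == 'u':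
--       u = True
--   return a and e and i and o and u
-- ===== Notes on version B (the rewrite author's own statement) =====
-- stated objective: alternative
-- what changed: Inverts the traversal: instead of looping over the five vowels and scanning the word for each, B makes one left-to-right pass over the lowercased word maintaining five found-flags and conjoins them at the end.
import Mathlib
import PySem

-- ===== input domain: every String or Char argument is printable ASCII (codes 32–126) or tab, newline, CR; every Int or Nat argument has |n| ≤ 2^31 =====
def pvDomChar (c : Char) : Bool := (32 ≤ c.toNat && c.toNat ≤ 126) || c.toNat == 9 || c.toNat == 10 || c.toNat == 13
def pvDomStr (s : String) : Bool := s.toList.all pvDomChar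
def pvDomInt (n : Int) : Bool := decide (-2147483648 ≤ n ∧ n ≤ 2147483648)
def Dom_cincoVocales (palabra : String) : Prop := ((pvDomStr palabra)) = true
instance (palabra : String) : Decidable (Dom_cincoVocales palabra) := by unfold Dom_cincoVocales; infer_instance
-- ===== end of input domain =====

-- B inverts the traversal: one left-to-right pass over the lowercased word maintaining five
-- found-flags, instead of A's loop over the vowel tuple with a substring scan per vowel.


-- ===== PORT A =====
-- A loops over the vowel tuple, returning False on the first vowel not found as a substring.
def cincoVocalesLoop (p : String) : List String → Bool
  | [] => true
  | v :: rest => if PySem.Str.isIn v p then cincoVocalesLoop p rest else false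

def cincoVocales (palabra : String) : Bool :=
  let p := PySem.Str.lower palabra
  cincoVocalesLoop p ["a", "e", "i", "o", "u"]

-- ===== PORT B =====
-- one step of B's for-loop: the if/elif chain updating the five flags (a,e,i,o,u)
def cincoFlagStep (st : Bool × Bool × Bool × Bool × Bool) (c : Char) :
    Bool × Bool × Bool × Bool × Bool :=
  if c = 'a' then (true, st.2.1, st.2.2.1, st.2.2.2.1, st.2.2.2.2)
  else if c = 'e' then (st.1, true, st.2.2.1, st.2.2.2.1, st.2.2.2.2)
  else if c = 'i' then (st.1, st.2.1, true, st.2.2.2.1, st.2.2.2.2)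
  else if c = 'o' then (st.1, st.2.1, st.2.2.1, true, st.2.2.2.2)
  else if c = 'u' then (st.1, st.2.1, st.2.2.1, st.2.2.2.1, true)
  else st

def cincoVocales_alt (palabra : String) : Bool :=
  let r := (PySem.Str.lower palabra).toList.foldl cincoFlagStep
    (false, false, false, false, false)
  r.1 && r.2.1 && r.2.2.1 && r.2.2.2.1 && r.2.2.2.2

-- ===== PRECONDITION & SPEC =====
def Spec_cincoVocales (palabra : String) (out : Bool) : Prop := out = cincoVocales_alt palabra
instance (palabra : String) (out : Bool) : Decidable (Spec_cincoVocales palabra out) := by unfold Spec_cincoVocales; infer_instance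

-- ===== CLAIM (what is proved, stated in full; the proofs are below) =====
def Claim_equal_cincoVocales : Prop := ∀ (palabra : String), Dom_cincoVocales palabra → Spec_cincoVocales palabra (cincoVocales palabra)

-- ===== LEMMAS AND PROOFS =====
lemma singleton_infix_iff {a : Char} {l : List Char} : [a] <:+: l ↔ a ∈ l := by
  constructor
  · intro h; exact h.mem (by simp)
  · intro h
    obtain ⟨s, t, rfl⟩ := List.mem_iff_append.mp h
    exact ⟨s, t, by simp⟩

lemma isIn_single (c : Char) (l : List Char) :
    PySem.Chars.isIn [c] l = true ↔ c ∈ l := by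
  have h := PySem.Str.isIn_iff_infix (String.ofList [c]) (String.ofList l)
  simpa [PySem.Str.isIn, singleton_infix_iff] using h

lemma cincoFlagStep_eq (a e i o u : Bool) (c : Char) :
    cincoFlagStep (a, e, i, o, u) c =
      (a || (c == 'a'), e || (c == 'e'), i || (c == 'i'), o || (c == 'o'), u || (c == 'u')) := by
  unfold cincoFlagStep
  by_cases ha : c = 'a' <;> by_cases he : c = 'e' <;> by_cases hi : c = 'i' <;>
    by_cases ho : c = 'o' <;> by_cases hu : c = 'u' <;>
    simp_all

lemma foldl_cincoFlagStep (l : List Char) (a e i o u : Bool) :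
    List.foldl cincoFlagStep (a, e, i, o, u) l =
      (a || decide ('a' ∈ l), e || decide ('e' ∈ l), i || decide ('i' ∈ l),
       o || decide ('o' ∈ l), u || decide ('u' ∈ l)) := by
  induction l generalizing a e i o u with
  | nil => simp
  | cons c t ih =>
    simp only [List.foldl_cons, cincoFlagStep_eq, ih]
    simp [List.mem_cons, Bool.or_assoc, eq_comm, Bool.beq_eq_decide_eq]

-- ===== VERDICT (by name: the statement is the Claim_ definition above) =====
theorem cincoVocales_spec : Claim_equal_cincoVocales := by
  intro palabra _
  unfold Spec_cincoVocales
  set p := PySem.Str.lower palabra with hp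
  have hA : cincoVocales palabra = true ↔
      ('a' ∈ p.toList ∧ 'e' ∈ p.toList ∧ 'i' ∈ p.toList ∧ 'o' ∈ p.toList ∧ 'u' ∈ p.toList) := by
    have ea : ("a" : String) = String.ofList ['a'] := rfl
    have ee : ("e" : String) = String.ofList ['e'] := rfl
    have ei : ("i" : String) = String.ofList ['i'] := rfl
    have eo : ("o" : String) = String.ofList ['o'] := rfl
    have eu : ("u" : String) = String.ofList ['u'] := rfl
    simp only [cincoVocales, cincoVocalesLoop, ← hp, ea, ee, ei, eo, eu]
    by_cases ha : 'a' ∈ p.toList <;> by_cases he : 'e' ∈ p.toList <;>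
      by_cases hi : 'i' ∈ p.toList <;> by_cases ho : 'o' ∈ p.toList <;>
      by_cases hu : 'u' ∈ p.toList <;>
      simp [isIn_single, ha, he, hi, ho, hu]
  have hB : cincoVocales_alt palabra = true ↔
      ('a' ∈ p.toList ∧ 'e' ∈ p.toList ∧ 'i' ∈ p.toList ∧ 'o' ∈ p.toList ∧ 'u' ∈ p.toList) := by
    simp [cincoVocales_alt, ← hp, foldl_cincoFlagStep, and_assoc]
  rw [Bool.eq_iff_iff, hA, hB]
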